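-- pv_equiv track=rewrite | github.com/Roman-Arcturus/learn_python | src/learn_python/higher_function_pipeline.py | exercise_4
-- ===== SOURCE A (Python) =====
-- def exercise_4(scores: list) -> tuple:
--     all_int = all( isinstance(n, int) for n in scores )
--     if not all_int:
--         return (None, None, None, all_int)
--
--     any_above_8 = any(n > 8 for n in scores)
--     all_above_2 = all(n > 2 for n in scores)
--     any_equal_0 = any(n == 0 for n in scores)
--
--     return ( any_above_8, all_above_2, any_equal_0, all_int )
-- ===== SOURCE B (Python) =====
-- def exercise_4(scores: list) -> tuple:
--     any_above_8 = False
--     all_above_2 = True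
--     any_equal_0 = False
--     for n in scores:
--         if not isinstance(n, int):
--             return (None, None, None, False)
--         if n > 8:
--             any_above_8 = True
--         if not (n > 2):
--             all_above_2 = False
--         if n == 0:
--             any_equal_0 = True
--     return (any_above_8, all_above_2, any_equal_0, True)
-- ===== Notes on version B (the rewrite author's own statement) =====
-- stated objective: alternative
-- what changed: Replaces four separate generator scans (all/any/all/any) with one explicit loop that maintains three flags and short-circuits on a non-int element.
import Mathlib
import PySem

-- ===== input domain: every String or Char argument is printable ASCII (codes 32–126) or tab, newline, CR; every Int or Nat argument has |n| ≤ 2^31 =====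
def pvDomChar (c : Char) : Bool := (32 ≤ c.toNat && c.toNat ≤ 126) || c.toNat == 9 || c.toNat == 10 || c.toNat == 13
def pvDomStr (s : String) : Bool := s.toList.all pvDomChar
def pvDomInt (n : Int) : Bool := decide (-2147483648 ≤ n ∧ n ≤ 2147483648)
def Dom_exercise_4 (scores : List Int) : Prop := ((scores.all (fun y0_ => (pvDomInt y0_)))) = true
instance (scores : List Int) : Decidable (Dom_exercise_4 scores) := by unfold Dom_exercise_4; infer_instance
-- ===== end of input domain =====

-- B: one explicit loop maintaining three flags instead of four separate any/all scans (alternative decomposition, same cost).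
-- ===== PORT A =====
-- isinstance(n, int) is always true for an Int element, so the `all_int` scan yields true.
def exercise_4 (scores : List Int) : Option Bool × Option Bool × Option Bool × Bool :=
  let all_int := scores.all (fun _ => true)
  if all_int = false then (none, none, none, all_int)
  else
    let any_above_8 := scores.any (fun n => decide (n > 8))
    let all_above_2 := scores.all (fun n => decide (n > 2))
    let any_equal_0 := scores.any (fun n => decide (n = 0))
    (some any_above_8, some all_above_2, some any_equal_0, all_int)

-- ===== PORT B =====
-- the non-int branch of Source B is unreachable for List Int, so the loop only updates the flags.
def exercise4AltLoop (scores : List Int) (a8 a2 e0 : Bool) : Option Bool × Option Bool × Option Bool × Bool :=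
  match scores with
  | [] => (some a8, some a2, some e0, true)
  | n :: rest =>
      exercise4AltLoop rest
        (if decide (n > 8) then true else a8)
        (if ¬ decide (n > 2) then false else a2)
        (if decide (n = 0) then true else e0)

def exercise_4_alt (scores : List Int) : Option Bool × Option Bool × Option Bool × Bool :=
  exercise4AltLoop scores false true false

-- ===== PRECONDITION & SPEC =====
def Spec_exercise_4 (scores : List Int) (out : Option Bool × Option Bool × Option Bool × Bool) : Prop := out = exercise_4_alt scores
instance (scores : List Int) (out : Option Bool × Option Bool × Option Bool × Bool) : Decidable (Spec_exercise_4 scores out) := by unfold Spec_exercise_4; infer_instance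

-- ===== CLAIM (what is proved, stated in full; the proofs are below) =====
def Claim_equal_exercise_4 : Prop := ∀ (scores : List Int), Dom_exercise_4 scores → Spec_exercise_4 scores (exercise_4 scores)

-- ===== LEMMAS AND PROOFS =====

-- ===== VERDICT (by name: the statement is the Claim_ definition above) =====
lemma exercise4AltLoop_char (scores : List Int) : ∀ (a8 a2 e0 : Bool),
    exercise4AltLoop scores a8 a2 e0 =
      (some (a8 || scores.any (fun n => decide (n > 8))),
       some (a2 && scores.all (fun n => decide (n > 2))),
       some (e0 || scores.any (fun n => decide (n = 0))), true) := by
  induction scores with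
  | nil => intro a8 a2 e0; simp [exercise4AltLoop]
  | cons n rest ih =>
      intro a8 a2 e0
      simp only [exercise4AltLoop, ih, List.any_cons, List.all_cons]
      by_cases h8 : n > 8 <;> by_cases h2 : n > 2 <;> by_cases h0 : n = 0 <;>
        simp [h8, h2, h0]

theorem exercise_4_spec : Claim_equal_exercise_4 := by
  intro scores _
  unfold Spec_exercise_4 exercise_4 exercise_4_alt
  rw [exercise4AltLoop_char]
  simp
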